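-- pv_equiv track=rewrite | github.com/ersadul/ersadul | python/ritza/exercise7.py | sum_without_firste
-- ===== SOURCE A (Python) =====
-- def sum_without_firste(num_list):
--     total = 0
--     first = True
--     for num in num_list:
--         if first == True and num % 2 == 0:
--             first = False
--             continue
--         else:
--             total += num
--     return total
-- ===== SOURCE B (Python) =====
-- def sum_without_firste(num_list):
--     total = sum(num_list)
--     for num in num_list:
--         if num % 2 == 0:
--             return total - num
--     return total
-- ===== Notes on version B (the rewrite author's own statement) =====
-- stated objective: simpler
-- what changed: Replaces A's stateful single pass with a boolean 'first' flag and continue by a compute-then-correct decomposition: sum the whole list with the built-in sum() (a C-level loop), then scan for the first even element and subtract it.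
import Mathlib
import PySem

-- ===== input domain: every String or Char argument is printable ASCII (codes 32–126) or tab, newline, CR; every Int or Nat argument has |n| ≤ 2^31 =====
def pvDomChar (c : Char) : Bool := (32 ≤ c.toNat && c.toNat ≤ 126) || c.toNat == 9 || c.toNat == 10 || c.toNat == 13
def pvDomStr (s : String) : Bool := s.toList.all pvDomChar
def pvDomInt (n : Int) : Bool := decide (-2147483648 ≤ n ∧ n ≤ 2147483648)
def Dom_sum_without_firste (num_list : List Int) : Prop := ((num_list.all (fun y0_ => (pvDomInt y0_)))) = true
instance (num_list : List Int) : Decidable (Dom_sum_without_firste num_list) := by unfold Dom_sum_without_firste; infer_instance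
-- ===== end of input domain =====

-- B changes A's stateful flag-and-continue loop into compute-then-correct: sum everything, subtract the first even element (objective: simpler).

-- ===== PORT A =====
-- A's loop carries state (total, first); ported as structural recursion over the list with the same state.
def sumWithoutFirsteLoop : List Int → Int → Bool → Int
  | [], total, _ => total
  | num :: rest, total, first =>
      if first = true ∧ PySem.Int.mod num 2 = 0 then
        sumWithoutFirsteLoop rest total false
      else
        sumWithoutFirsteLoop rest (total + num) first

def sum_without_firste (num_list : List Int) : Int :=
  sumWithoutFirsteLoop num_list 0 true

-- ===== PORT B =====
-- B: total = sum(num_list); then scan for the first even element and return total - num there.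
def sumWithoutFirsteAltScan (total : Int) : List Int → Int
  | [] => total
  | num :: rest =>
      if PySem.Int.mod num 2 = 0 then total - num
      else sumWithoutFirsteAltScan total rest

def sum_without_firste_alt (num_list : List Int) : Int :=
  sumWithoutFirsteAltScan (num_list.foldl (· + ·) 0) num_list

-- ===== PRECONDITION & SPEC =====
def Spec_sum_without_firste (num_list : List Int) (out : Int) : Prop := out = sum_without_firste_alt num_list
instance (num_list : List Int) (out : Int) : Decidable (Spec_sum_without_firste num_list out) := by unfold Spec_sum_without_firste; infer_instance

-- ===== CLAIM (what is proved, stated in full; the proofs are below) =====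
def Claim_equal_sum_without_firste : Prop := ∀ (num_list : List Int), Dom_sum_without_firste num_list → Spec_sum_without_firste num_list (sum_without_firste num_list)

-- ===== LEMMAS AND PROOFS =====

theorem foldl_shift (l : List Int) (a : Int) :
    l.foldl (· + ·) a = a + l.foldl (· + ·) 0 := by
  induction l generalizing a with
  | nil => simp
  | cons x xs ih => simp only [List.foldl]; rw [ih (a + x), ih (0 + x)]; omega

-- The scan's total parameter shifts out additively.
theorem scan_shift (m : List Int) (a b : Int) :
    sumWithoutFirsteAltScan (a + b) m = a + sumWithoutFirsteAltScan b m := by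
  induction m with
  | nil => simp [sumWithoutFirsteAltScan]
  | cons x xs ih =>
      by_cases hx : PySem.Int.mod x 2 = 0 <;>
        simp [sumWithoutFirsteAltScan, ih] <;> omega

-- Once the flag is false, A's loop just adds everything to the accumulator.
theorem loop_false (l : List Int) (t : Int) :
    sumWithoutFirsteLoop l t false = t + l.foldl (· + ·) 0 := by
  induction l generalizing t with
  | nil => simp [sumWithoutFirsteLoop]
  | cons n rest ih =>
      simp only [sumWithoutFirsteLoop, if_neg (by simp : ¬ (false = true ∧ PySem.Int.mod n 2 = 0)),
        List.foldl]
      rw [ih, foldl_shift rest (0 + n)]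
      omega

theorem loop_true (l : List Int) (t : Int) :
    sumWithoutFirsteLoop l t true = t + sumWithoutFirsteAltScan (l.foldl (· + ·) 0) l := by
  induction l generalizing t with
  | nil => simp [sumWithoutFirsteLoop, sumWithoutFirsteAltScan]
  | cons n rest ih =>
      have hfold : (n :: rest).foldl (· + ·) 0 = n + rest.foldl (· + ·) 0 := by
        simp only [List.foldl]; rw [foldl_shift rest (0 + n)]; omega
      show (if true = true ∧ PySem.Int.mod n 2 = 0 then sumWithoutFirsteLoop rest t false
              else sumWithoutFirsteLoop rest (t + n) true) = _
      by_cases h : PySem.Int.mod n 2 = 0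
      · rw [if_pos ⟨rfl, h⟩, loop_false, hfold,
          show sumWithoutFirsteAltScan (n + rest.foldl (· + ·) 0) (n :: rest)
             = if PySem.Int.mod n 2 = 0 then n + rest.foldl (· + ·) 0 - n
               else sumWithoutFirsteAltScan (n + rest.foldl (· + ·) 0) rest from rfl,
          if_pos h]
        omega
      · rw [if_neg (fun hc => h hc.2), ih, hfold,
          show sumWithoutFirsteAltScan (n + rest.foldl (· + ·) 0) (n :: rest)
             = if PySem.Int.mod n 2 = 0 then n + rest.foldl (· + ·) 0 - n
               else sumWithoutFirsteAltScan (n + rest.foldl (· + ·) 0) rest from rfl,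
          if_neg h, scan_shift]
        omega

-- ===== VERDICT (by name: the statement is the Claim_ definition above) =====
theorem sum_without_firste_spec : Claim_equal_sum_without_firste := by
  intro l _
  unfold Spec_sum_without_firste sum_without_firste sum_without_firste_alt
  rw [loop_true]
  omega
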